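-- pv_equiv track=rewrite | github.com/Sharma-Pragya/AutoTA | autota/verify/boolean.py | _make_and_explicit
-- ===== SOURCE A (Python) =====
-- def _make_and_explicit(expr: str) -> str:
--     """Add explicit * for implicit AND operations.
--
--     Args:
--         expr: Expression that may have implicit AND
--
--     Returns:
--         Expression with explicit * for all AND operations
--     """
--     result = []
--     i = 0
--     while i < len(expr):
--         result.append(expr[i])
--
--         # Check if we need to insert * after this character
--         if i < len(expr) - 1:
--             curr = expr[i]
--             next_char = expr[i + 1]
--
--             # Insert * between:
--             # - variable/literal and variable (AB -> A*B)
--             # - ) and variable/( (e.g., (A)B -> (A)*B)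
--             # - ' and variable/( (e.g., A'B -> A'*B)
--             should_insert = False
--
--             if curr.isalnum() and next_char.isalnum():
--                 should_insert = True
--             elif curr.isalnum() and next_char == "(":
--                 should_insert = True
--             elif curr == ")" and (next_char.isalnum() or next_char == "("):
--                 should_insert = True
--             elif curr == "'" and (next_char.isalnum() or next_char == "("):
--                 should_insert = True
--
--             if should_insert:
--                 result.append("*")
--
--         i += 1
--
--     return "".join(result)
-- ===== SOURCE B (Python) =====
-- import re
--
-- # Zero-width regex: insert '*' at every position with a left context in
-- # [0-9A-Za-z)'] and a right context in [0-9A-Za-z(].  Lookaround consumes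
-- # nothing, so runs like 'ABC' become 'A*B*C'.
-- _IMPLICIT_AND = re.compile(r"(?<=[0-9A-Za-z)'])(?=[0-9A-Za-z(])")
--
--
-- def _make_and_explicit(expr: str) -> str:
--     """Add explicit * for implicit AND operations."""
--     return _IMPLICIT_AND.sub("*", expr)
-- ===== Notes on version B (the rewrite author's own statement) =====
-- stated objective: idiomatic
-- what changed: Replaces A's index-based while loop with manual lookahead and a four-branch if/elif chain by a single precompiled zero-width regex substitution (lookbehind [0-9A-Za-z)'], lookahead [0-9A-Za-z(]) that delegates the whole scan to the regex engine, with no explicit Python character loop.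
import Mathlib
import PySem

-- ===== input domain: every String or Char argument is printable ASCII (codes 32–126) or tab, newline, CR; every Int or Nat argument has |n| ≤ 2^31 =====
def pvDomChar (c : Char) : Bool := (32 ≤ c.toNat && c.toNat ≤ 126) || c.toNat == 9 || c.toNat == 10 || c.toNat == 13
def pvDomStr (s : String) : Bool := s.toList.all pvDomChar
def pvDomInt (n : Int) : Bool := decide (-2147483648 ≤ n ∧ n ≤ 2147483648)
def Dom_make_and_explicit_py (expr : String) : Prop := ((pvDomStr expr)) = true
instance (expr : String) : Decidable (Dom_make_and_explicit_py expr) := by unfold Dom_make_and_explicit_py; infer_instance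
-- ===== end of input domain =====

-- B replaces A's index loop with lookahead and a four-branch if/elif chain by one
-- zero-width regex substitution (lookbehind class [0-9A-Za-z)'], lookahead class
-- [0-9A-Za-z(]) — more idiomatic; same O(n) cost.

-- ===== PORT A =====
-- the four-branch if/elif chain of A, in source order
def pvShouldInsertA (curr next_char : Char) : Bool :=
  if curr.isAlphanum && next_char.isAlphanum then true
  else if curr.isAlphanum && next_char == '(' then true
  else if curr == ')' && (next_char.isAlphanum || next_char == '(') then true
  else if curr == '\'' && (next_char.isAlphanum || next_char == '(') then true
  else false

-- A's while loop: append expr[i], and when a next character exists, maybe append '*'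
def pvLoopA : List Char → List Char
  | [] => []
  | [c] => [c]
  | c :: d :: rest =>
      if pvShouldInsertA c d then c :: '*' :: pvLoopA (d :: rest)
      else c :: pvLoopA (d :: rest)

def make_and_explicit_py (expr : String) : String :=
  String.mk (pvLoopA expr.toList)

-- ===== PORT B =====
-- the regex character classes, as the literal ranges of Source B's pattern
def pvLookbehind (c : Char) : Bool :=          -- [0-9A-Za-z)']
  ('0' ≤ c && c ≤ '9') || ('A' ≤ c && c ≤ 'Z') || ('a' ≤ c && c ≤ 'z')
    || c == ')' || c == '\''
def pvLookahead (c : Char) : Bool :=           -- [0-9A-Za-z(]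
  ('0' ≤ c && c ≤ '9') || ('A' ≤ c && c ≤ 'Z') || ('a' ≤ c && c ≤ 'z')
    || c == '('

-- the regex engine's scan: at each position, if the zero-width pattern matches
-- (previous char in the lookbehind class, current char in the lookahead class),
-- emit the replacement '*' before the current character
def pvReSub (prev : Option Char) : List Char → List Char
  | [] => []
  | c :: rest =>
      if (prev.any pvLookbehind) && pvLookahead c
      then '*' :: c :: pvReSub (some c) rest
      else c :: pvReSub (some c) rest

def make_and_explicit_py_alt (expr : String) : String :=
  String.mk (pvReSub none expr.toList)

-- ===== PRECONDITION & SPEC =====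
def Spec_make_and_explicit_py (expr : String) (out : String) : Prop := out = make_and_explicit_py_alt expr
instance (expr : String) (out : String) : Decidable (Spec_make_and_explicit_py expr out) := by unfold Spec_make_and_explicit_py; infer_instance

-- ===== CLAIM (what is proved, stated in full; the proofs are below) =====
def Claim_equal_make_and_explicit_py : Prop := ∀ (expr : String), Dom_make_and_explicit_py expr → Spec_make_and_explicit_py expr (make_and_explicit_py expr)

-- ===== LEMMAS AND PROOFS =====
-- Char.isAlphanum is exactly the ASCII ranges of the regex classes
theorem isAlphanum_eq (c : Char) :
    c.isAlphanum = (('0' ≤ c && c ≤ '9') || ('A' ≤ c && c ≤ 'Z') || ('a' ≤ c && c ≤ 'z')) := by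
  simp only [Char.isAlphanum, Char.isAlpha, Char.isDigit, Char.isUpper, Char.isLower,
    Char.le_def]
  rw [Bool.eq_iff_iff]
  simp only [Bool.or_eq_true, Bool.and_eq_true, decide_eq_true_eq, UInt32.le_iff_toNat_le]
  omega

-- A's if/elif chain computes exactly "left class matches and right class matches"
theorem pvShouldInsert_eq (c d : Char) :
    pvShouldInsertA c d = (pvLookbehind c && pvLookahead d) := by
  unfold pvShouldInsertA pvLookbehind pvLookahead
  rw [← isAlphanum_eq c, ← isAlphanum_eq d]
  cases hA : c.isAlphanum <;> cases hB : d.isAlphanum <;>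
    cases hp : (d == '(') <;> cases hq : (c == ')') <;> cases hr : (c == '\'') <;>
      simp_all

-- A's pair loop and the regex scan (carrying the previous character) agree
theorem pvLoop_eq_reSub (cs : List Char) (c : Char) :
    pvLoopA (c :: cs) = c :: pvReSub (some c) cs := by
  induction cs generalizing c with
  | nil => rfl
  | cons d rest ih =>
      simp only [pvLoopA, pvReSub, pvShouldInsert_eq, Option.any_some, ih d]
      split <;> rfl

-- ===== VERDICT (by name: the statement is the Claim_ definition above) =====
theorem make_and_explicit_py_spec : Claim_equal_make_and_explicit_py := by
  intro expr _
  unfold Spec_make_and_explicit_py make_and_explicit_py make_and_explicit_py_alt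
  cases h : expr.toList with
  | nil => rfl
  | cons c cs => rw [pvLoop_eq_reSub, pvReSub]; simp
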